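-- pv_equiv track=rewrite | github.com/vlad-marlo/algorithms | school/ege/vars/25021990/27.py | solution
-- ===== SOURCE A (Python) =====
-- def solution(data: list[int]) -> int:
--     data = list(map(lambda x: x // 48 + int(x % 48 != 0), data))
--     ans = 100 ** 100
--     sm = sum(data)
--     c = 0
--     for i in range(1, len(data)):
--         c += data[i] * i
--     b = data[0]
--     for i in range(1, len(data)):
--         c += 2 * b - sm
--         if data[i] != 0:
--             ans = min(ans, c)
--         b += data[i]
--     return ans
-- ===== SOURCE B (Python) =====
-- def solution(data: list[int]) -> int:
--     d = [x // 48 + (1 if x % 48 != 0 else 0) for x in data]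
--     ans = 100 ** 100
--     for i in range(1, len(d)):
--         if d[i] != 0:
--             ans = min(ans, sum(d[j] * abs(j - i) for j in range(len(d))))
--     return ans
-- ===== Notes on version B (the rewrite author's own statement) =====
-- stated objective: simpler
-- what changed: Replaces A's incremental-derivative single pass (running prefix sum b and rolling cost c updated by c += 2*b - sm) with a direct recomputation of the per-split cost sum(d[j]*|j-i|) for each candidate split i, which is plainly the quantity being minimized.
import Mathlib
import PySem

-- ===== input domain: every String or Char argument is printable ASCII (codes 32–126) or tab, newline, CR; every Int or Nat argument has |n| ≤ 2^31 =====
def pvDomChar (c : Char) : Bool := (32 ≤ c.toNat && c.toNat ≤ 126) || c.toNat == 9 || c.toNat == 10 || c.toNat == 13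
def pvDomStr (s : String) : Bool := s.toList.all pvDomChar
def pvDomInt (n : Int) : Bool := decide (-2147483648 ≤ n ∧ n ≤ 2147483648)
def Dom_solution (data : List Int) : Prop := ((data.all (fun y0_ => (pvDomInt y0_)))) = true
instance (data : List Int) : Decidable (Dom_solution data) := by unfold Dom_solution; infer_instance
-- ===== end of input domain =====

-- B replaces A's incremental single pass (rolling cost updated by c += 2*b - sm) with a
-- direct per-split recomputation of the cost sum(d[j]*|j-i|): simpler, not faster.

-- ===== PORT A =====
-- x // 48 + int(x % 48 != 0), Python floor-division/mod semantics (divisor 48 > 0)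
def pvCeil (x : Int) : Int :=
  PySem.Int.floordiv x 48 + (if PySem.Int.mod x 48 ≠ 0 then 1 else 0)

def solution (data : List Int) : Int :=
  let d := data.map pvCeil
  let ans : Int := 100 ^ 100
  let sm := d.sum
  -- for i in range(1, len(data)): c += data[i] * i   (index always in range)
  let c := (List.range' 1 (d.length - 1)).foldl (fun c i => c + d.getD i 0 * (i : Int)) 0
  let b := d.getD 0 0   -- the first-element read; Python raises IndexError on the empty list, excluded by Pre_
  let s := (List.range' 1 (d.length - 1)).foldl
    (fun (s : Int × Int × Int) i =>
      let c := s.2.1 + 2 * s.2.2 - sm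
      let ans := if d.getD i 0 ≠ 0 then min s.1 c else s.1
      (ans, c, s.2.2 + d.getD i 0)) (ans, c, b)
  s.1

-- ===== PORT B =====
-- sum(d[j] * abs(j - i) for j in range(len(d)))
def pvCost (d : List Int) (i : Nat) : Int :=
  (List.range d.length).foldl (fun s j => s + d.getD j 0 * |(j : Int) - (i : Int)|) 0

def solution_alt (data : List Int) : Int :=
  let d := data.map pvCeil
  (List.range' 1 (d.length - 1)).foldl
    (fun ans i => if d.getD i 0 ≠ 0 then min ans (pvCost d i) else ans) (100 ^ 100)

-- ===== PRECONDITION & SPEC =====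
-- Pre_ excludes only the empty list, on which Python A raises IndexError reading the first element.
def Pre_solution (data : List Int) : Prop := data ≠ []
instance (data : List Int) : Decidable (Pre_solution data) := by unfold Pre_solution; infer_instance
def pvWitness_solution : List Int := ([5, 100, 49])

def Spec_solution (data : List Int) (out : Int) : Prop := out = solution_alt data
instance (data : List Int) (out : Int) : Decidable (Spec_solution data out) := by unfold Spec_solution; infer_instance

-- ===== CLAIM (what is proved, stated in full; the proofs are below) =====
def Claim_equal_solution : Prop := ∀ (data : List Int), Dom_solution data → Pre_solution data → Spec_solution data (solution data)

-- ===== LEMMAS AND PROOFS =====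

-- math layer: dg = 0-defaulted access, pvC i = cost of split i, pvP i = prefix sum
def dg (d : List Int) (j : Nat) : Int := d.getD j 0
def pvC (d : List Int) (i : Nat) : Int := ∑ j ∈ Finset.range d.length, dg d j * |(j : Int) - (i : Int)|
def pvP (d : List Int) (i : Nat) : Int := ∑ j ∈ Finset.range i, dg d j

lemma foldl_add_sum (g : Nat → Int) (l : List Nat) (a : Int) :
    l.foldl (fun s j => s + g j) a = a + (l.map g).sum := by
  induction l generalizing a with
  | nil => simp
  | cons x t ih => simp [List.foldl_cons, ih]; ring

lemma map_range_sum (g : Nat → Int) (n : Nat) :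
    ((List.range n).map g).sum = ∑ j ∈ Finset.range n, g j := by
  induction n with
  | zero => simp
  | succ n ih => rw [List.range_succ, Finset.sum_range_succ]; simp [ih]

lemma sum_eq_pvP (d : List Int) : d.sum = pvP d d.length := by
  induction d with
  | nil => simp [pvP]
  | cons a t ih =>
      rw [List.sum_cons, ih]
      simp only [pvP, List.length_cons, Finset.sum_range_succ' (fun j => dg (a :: t) j)]
      simp [dg, add_comm]

lemma pvP_succ_cons (a : Int) (t : List Int) (i : Nat) :
    pvP (a :: t) (i + 1) = a + pvP t i := by
  simp only [pvP, Finset.sum_range_succ' (fun j => dg (a :: t) j)]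
  simp [dg, add_comm]

lemma pvC_succ_cons (a : Int) (t : List Int) (i : Nat) :
    pvC (a :: t) (i + 1) = a * ((i : Int) + 1) + pvC t i := by
  rw [pvC, List.length_cons, Finset.sum_range_succ']
  have h : (∑ j ∈ Finset.range t.length,
      dg (a :: t) (j + 1) * |((j + 1 : Nat) : Int) - ((i + 1 : Nat) : Int)|) = pvC t i := by
    rw [pvC]
    refine Finset.sum_congr rfl (fun j _ => ?_)
    have e1 : dg (a :: t) (j + 1) = dg t j := by simp [dg]
    have e2 : ((j + 1 : Nat) : Int) - ((i + 1 : Nat) : Int) = (j : Int) - (i : Int) := by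
      push_cast; ring
    rw [e1, e2]
  rw [h]
  have e3 : |((0 : Nat) : Int) - ((i + 1 : Nat) : Int)| = (i : Int) + 1 := by
    rw [Nat.cast_zero, zero_sub, abs_neg, abs_of_nonneg (by positivity)]; push_cast; ring
  have e4 : dg (a :: t) 0 = a := by simp [dg]
  rw [e3, e4]; ring

lemma pvC_zero_cons (a : Int) (t : List Int) :
    pvC (a :: t) 0 = pvC t 0 + t.sum := by
  rw [pvC, List.length_cons, Finset.sum_range_succ']
  have h : ∀ j ∈ Finset.range t.length,
      dg (a :: t) (j + 1) * |((j + 1 : Nat) : Int) - ((0 : Nat) : Int)|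
        = dg t j * |(j : Int) - ((0 : Nat) : Int)| + dg t j := by
    intro j _
    have e1 : dg (a :: t) (j + 1) = dg t j := by simp [dg]
    have e2 : |((j + 1 : Nat) : Int) - ((0 : Nat) : Int)| = (j : Int) + 1 := by
      push_cast; rw [sub_zero]; exact abs_of_nonneg (by positivity)
    have e3 : |(j : Int) - ((0 : Nat) : Int)| = (j : Int) := by
      push_cast; rw [sub_zero]; exact abs_of_nonneg (by positivity)
    rw [e1, e2, e3]; ring
  rw [Finset.sum_congr rfl h, Finset.sum_add_distrib]
  have e5 : t.sum = ∑ j ∈ Finset.range t.length, dg t j := sum_eq_pvP t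
  have e6 : dg (a :: t) 0 * |((0 : Nat) : Int) - ((0 : Nat) : Int)| = 0 := by simp
  rw [e6, ← e5, pvC]; ring

-- the derivative identity behind A's `c += 2 * b - sm`
lemma pvC_step (d : List Int) (i : Nat) :
    pvC d (i + 1) = pvC d i + 2 * pvP d (i + 1) - d.sum := by
  induction d generalizing i with
  | nil => simp [pvC, pvP, dg]
  | cons a t ih =>
      cases i with
      | zero =>
          rw [pvC_succ_cons, pvC_zero_cons, pvP_succ_cons]
          simp [pvP, List.sum_cons]; ring
      | succ k =>
          rw [pvC_succ_cons, pvC_succ_cons, pvP_succ_cons, ih k, List.sum_cons]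
          push_cast; ring

lemma pvCost_eq_pvC (d : List Int) (i : Nat) : pvCost d i = pvC d i := by
  simp [pvCost, foldl_add_sum, map_range_sum, pvC, dg]

lemma init_c_eq_pvC0 (d : List Int) :
    (List.range' 1 (d.length - 1)).foldl (fun c i => c + d.getD i 0 * (i : Int)) 0 = pvC d 0 := by
  rw [foldl_add_sum (fun i => d.getD i 0 * (i : Int))]
  have hC : pvC d 0 = ((List.range d.length).map (fun i => d.getD i 0 * (i : Int))).sum := by
    rw [pvC, map_range_sum]
    refine Finset.sum_congr rfl (fun j _ => ?_)
    have : |(j : Int) - ((0 : Nat) : Int)| = (j : Int) := by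
      push_cast; rw [sub_zero]; exact abs_of_nonneg (by positivity)
    rw [this, dg]
  rw [hC]
  cases d with
  | nil => simp
  | cons a t =>
      have hr : List.range (a :: t).length = 0 :: List.range' 1 ((a :: t).length - 1) := by
        rw [List.range_eq_range', List.length_cons, Nat.add_sub_cancel, List.range'_succ]
      rw [hr]; simp

-- loop invariant: A's fold starting from (ans, pvC d i, pvP d (i+1)) agrees with B's fold
lemma loop_eq (d : List Int) (m : Nat) :
    ∀ (i : Nat) (ans : Int),
    ((List.range' (i + 1) m).foldl
      (fun (s : Int × Int × Int) j =>
        (if d.getD j 0 ≠ 0 then min s.1 (s.2.1 + 2 * s.2.2 - d.sum) else s.1,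
         s.2.1 + 2 * s.2.2 - d.sum, s.2.2 + d.getD j 0)) (ans, pvC d i, pvP d (i + 1))).1
    = (List.range' (i + 1) m).foldl
        (fun ans j => if d.getD j 0 ≠ 0 then min ans (pvCost d j) else ans) ans := by
  induction m with
  | zero => intro i ans; simp
  | succ m ih =>
      intro i ans
      rw [List.range'_succ, List.foldl_cons, List.foldl_cons]
      have hc : pvC d i + 2 * pvP d (i + 1) - d.sum = pvC d (i + 1) := (pvC_step d i).symm
      have hb : pvP d (i + 1) + d.getD (i + 1) 0 = pvP d (i + 2) := by
        simp [pvP, Finset.sum_range_succ, dg]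
      simp only [hc, hb]
      rw [pvCost_eq_pvC d (i + 1)]
      exact ih (i + 1) _

-- ===== VERDICT (by name: the statement is the Claim_ definition above) =====
theorem solution_spec : Claim_equal_solution := by
  intro data _ _
  unfold Spec_solution solution solution_alt
  simp only []
  have h0 : (data.map pvCeil).getD 0 0 = pvP (data.map pvCeil) (0 + 1) := by
    simp [pvP, dg]
  rw [init_c_eq_pvC0, h0]
  have := loop_eq (data.map pvCeil) ((data.map pvCeil).length - 1) 0 (100 ^ 100)
  simpa [pvCost_eq_pvC] using this
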